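-- pv_equiv track=rewrite | github.com/datnguyenzzz/py_llvm_jit | code_test.py | addup_1
-- ===== SOURCE A (Python) =====
-- def addup_1(a,b):
--     step = 1
--     c = 0
--     for i in range(a,b,step):
--         if i%2==1:
--             c = c + 1
--         else:
--             c = c - 1
--     return c
-- ===== SOURCE B (Python) =====
-- def addup_1(a, b):
--     n = b - a if b > a else 0
--     odds = (n + a % 2) // 2
--     return 2 * odds - n
-- ===== Notes on version B (the rewrite author's own statement) =====
-- stated objective: faster
-- what changed: Replaces the per-element loop over range(a,b) with a closed-form count: odds = (n + a%2)//2 of n = max(b-a,0) elements, returning 2*odds - n.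
import Mathlib
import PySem

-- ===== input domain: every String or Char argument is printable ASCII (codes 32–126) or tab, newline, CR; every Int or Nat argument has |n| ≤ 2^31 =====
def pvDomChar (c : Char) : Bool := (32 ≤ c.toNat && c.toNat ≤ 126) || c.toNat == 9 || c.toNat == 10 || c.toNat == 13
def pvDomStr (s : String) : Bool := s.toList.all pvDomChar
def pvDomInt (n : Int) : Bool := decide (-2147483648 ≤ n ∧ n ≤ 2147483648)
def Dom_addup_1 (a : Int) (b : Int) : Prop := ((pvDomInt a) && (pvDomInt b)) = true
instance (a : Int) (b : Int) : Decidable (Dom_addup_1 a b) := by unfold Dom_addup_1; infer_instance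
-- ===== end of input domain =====

-- B replaces A's per-element loop over range(a,b) by a closed-form O(1) count (odds minus evens).

-- ===== PORT A =====
-- literal port: step = 1, c starts at 0, loop over range(a,b,step), i%2==1 branch
def addup_1 (a : Int) (b : Int) : Int :=
  let step : Int := 1
  (PySem.List.pyRange a b step).foldl
    (fun c i => if PySem.Int.mod i 2 == 1 then c + 1 else c - 1) 0

-- ===== PORT B =====
def addup_1_alt (a : Int) (b : Int) : Int :=
  let n : Int := if b > a then b - a else 0
  let odds : Int := PySem.Int.floordiv (n + PySem.Int.mod a 2) 2
  2 * odds - n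

-- ===== PRECONDITION & SPEC =====
def Spec_addup_1 (a : Int) (b : Int) (out : Int) : Prop := out = addup_1_alt a b
instance (a : Int) (b : Int) (out : Int) : Decidable (Spec_addup_1 a b out) := by unfold Spec_addup_1; infer_instance

-- ===== CLAIM (what is proved, stated in full; the proofs are below) =====
def Claim_equal_addup_1 : Prop := ∀ (a : Int) (b : Int), Dom_addup_1 a b → Spec_addup_1 a b (addup_1 a b)

-- ===== LEMMAS AND PROOFS =====

theorem pmod_eq (a : Int) : PySem.Int.mod a 2 = a % 2 := by
  simp only [PySem.Int.mod]; rw [Int.fmod_eq_emod]; simp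

theorem pfdiv_eq (x : Int) : PySem.Int.floordiv x 2 = x / 2 := by
  simp only [PySem.Int.floordiv]; rw [Int.fdiv_eq_ediv]; simp

-- the loop body is accumulator-shift-invariant
theorem addup_loop_shift (l : List Int) : ∀ (c : Int),
    l.foldl (fun c i => if PySem.Int.mod i 2 == 1 then c + 1 else c - 1) c
      = c + l.foldl (fun c i => if PySem.Int.mod i 2 == 1 then c + 1 else c - 1) 0 := by
  induction l with
  | nil => simp
  | cons x t ih =>
    intro c
    simp only [List.foldl_cons]
    rw [ih, ih (if PySem.Int.mod x 2 == 1 then (0:Int) + 1 else 0 - 1)]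
    generalize t.foldl (fun c i => if PySem.Int.mod i 2 == 1 then c + 1 else c - 1) 0 = F
    split_ifs <;> omega

theorem addup_main (n : Nat) : ∀ (a b : Int), b = a + n → addup_1 a b = addup_1_alt a b := by
  induction n with
  | zero =>
    intro a b hb
    have hba : b ≤ a := by omega
    simp only [addup_1, PySem.List.pyRange_one_eq_nil hba, List.foldl_nil,
      addup_1_alt, pmod_eq, pfdiv_eq]
    split_ifs <;> omega
  | succ n ih =>
    intro a b hb
    have hab : a < b := by omega
    simp only [addup_1]
    rw [PySem.List.pyRange_one_cons hab, List.foldl_cons, addup_loop_shift]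
    have hrec := ih (a + 1) b (by push_cast at hb ⊢; omega)
    simp only [addup_1] at hrec
    rw [hrec]
    simp only [addup_1_alt, pmod_eq, pfdiv_eq, beq_iff_eq]
    split_ifs <;> omega

theorem addup_eq (a b : Int) : addup_1 a b = addup_1_alt a b := by
  by_cases h : b ≤ a
  · simp only [addup_1, PySem.List.pyRange_one_eq_nil h, List.foldl_nil,
      addup_1_alt, pmod_eq, pfdiv_eq]
    split_ifs <;> omega
  · exact addup_main (b - a).toNat a b (by omega)

-- ===== VERDICT (by name: the statement is the Claim_ definition above) =====
theorem addup_1_spec : Claim_equal_addup_1 := by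
  intro a b _
  unfold Spec_addup_1
  exact addup_eq a b
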